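-- pv_equiv track=rewrite | github.com/doyaGu/BallanceModLoaderPlus | tools/generate_bml_imgui_api.py | strip_default_args
-- ===== SOURCE A (Python) =====
-- def strip_default_args(signature: str) -> str:
--     if signature == "()":
--         return signature
--
--     inner = signature.strip()
--     if not inner.startswith("(") or not inner.endswith(")"):
--         return signature
--     inner = inner[1:-1]
--
--     result: list[str] = []
--     depth_paren = 0
--     depth_angle = 0
--     depth_bracket = 0
--     skipping_default = False
--
--     for char in inner:
--         if char == "(":
--             depth_paren += 1
--         elif char == ")":
--             depth_paren = max(0, depth_paren - 1)
--         elif char == "<":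
--             depth_angle += 1
--         elif char == ">":
--             depth_angle = max(0, depth_angle - 1)
--         elif char == "[":
--             depth_bracket += 1
--         elif char == "]":
--             depth_bracket = max(0, depth_bracket - 1)
--
--         if skipping_default:
--             if char == "," and depth_paren == 0 and depth_angle == 0 and depth_bracket == 0:
--                 skipping_default = False
--                 result.append(char)
--             continue
--
--         if char == "=" and depth_paren == 0 and depth_angle == 0 and depth_bracket == 0:
--             skipping_default = True
--             continue
--
--         result.append(char)
--
--     stripped = "".join(result).strip()
--     return f"({stripped})" if stripped else "()"
-- ===== SOURCE B (Python) =====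
-- def _bump(ch, dp, da, db):
--     if ch == "(":
--         dp += 1
--     elif ch == ")":
--         dp = max(0, dp - 1)
--     elif ch == "<":
--         da += 1
--     elif ch == ">":
--         da = max(0, da - 1)
--     elif ch == "[":
--         db += 1
--     elif ch == "]":
--         db = max(0, db - 1)
--     return dp, da, db
--
--
-- def _split_top(inner):
--     """Split at commas sitting at zero paren/angle/bracket depth (depth updated before the test)."""
--     pieces = []
--     cur = []
--     dp = da = db = 0
--     for ch in inner:
--         dp, da, db = _bump(ch, dp, da, db)
--         if ch == "," and dp == 0 and da == 0 and db == 0: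
--             pieces.append("".join(cur))
--             cur = []
--         else:
--             cur.append(ch)
--     pieces.append("".join(cur))
--     return pieces
--
--
-- def _before_eq(piece):
--     """Text of the piece before its first '=' at zero depth (whole piece if none)."""
--     out = []
--     dp = da = db = 0
--     for ch in piece:
--         dp, da, db = _bump(ch, dp, da, db)
--         if ch == "=" and dp == 0 and da == 0 and db == 0:
--             return "".join(out)
--         out.append(ch)
--     return "".join(out)
--
--
-- def strip_default_args(signature: str) -> str:
--     if signature == "()":
--         return signature
--
--     inner = signature.strip()
--     if not inner.startswith("(") or not inner.endswith(")"):
--         return signature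
--     inner = inner[1:-1]
--
--     stripped = ",".join(_before_eq(p) for p in _split_top(inner)).strip()
--     return f"({stripped})" if stripped else "()"
-- ===== Notes on version B (the rewrite author's own statement) =====
-- stated objective: alternative
-- what changed: A's single five-state character machine (depth counters plus a skipping_default flag toggled inline) is replaced by a two-stage decomposition: split the inner string at top-level commas by depth tracking, cut each piece at its first top-level equals sign, and rejoin with commas.
import Mathlib
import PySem

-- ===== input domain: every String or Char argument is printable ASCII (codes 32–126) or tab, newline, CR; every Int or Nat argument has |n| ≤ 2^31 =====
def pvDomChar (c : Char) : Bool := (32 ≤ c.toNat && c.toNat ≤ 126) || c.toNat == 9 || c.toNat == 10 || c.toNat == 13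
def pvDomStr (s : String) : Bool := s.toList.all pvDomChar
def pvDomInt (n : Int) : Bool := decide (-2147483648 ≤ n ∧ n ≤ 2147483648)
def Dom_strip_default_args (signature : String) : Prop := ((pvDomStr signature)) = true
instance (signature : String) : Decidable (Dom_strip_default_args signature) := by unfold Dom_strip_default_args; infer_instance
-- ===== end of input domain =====

-- B replaces A's single five-state character machine by a split-at-top-level-commas /
-- cut-each-piece-before-its-first-top-level-equals-sign decomposition (objective: alternative decomposition, same cost).

-- shared depth bookkeeping (identical lines in both Pythons): update paren/angle/bracket depth for one char
def pvBump (c : Char) (dp da db : Int) : Int × Int × Int :=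
  if c = '(' then (dp + 1, da, db)
  else if c = ')' then (max 0 (dp - 1), da, db)
  else if c = '<' then (dp, da + 1, db)
  else if c = '>' then (dp, max 0 (da - 1), db)
  else if c = '[' then (dp, da, db + 1)
  else if c = ']' then (dp, da, max 0 (db - 1))
  else (dp, da, db)

-- ===== PORT A =====
-- A's loop body: state (depth_paren, depth_angle, depth_bracket, skipping_default, result)
def pvStepA (st : Int × Int × Int × Bool × List Char) (c : Char) :
    Int × Int × Int × Bool × List Char :=
  let (dp, da, db, sk, acc) := st
  let (dp', da', db') := pvBump c dp da db
  if sk then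
    if c = ',' ∧ dp' = 0 ∧ da' = 0 ∧ db' = 0 then (dp', da', db', false, acc ++ [c])
    else (dp', da', db', true, acc)
  else if c = '=' ∧ dp' = 0 ∧ da' = 0 ∧ db' = 0 then (dp', da', db', true, acc)
  else (dp', da', db', sk, acc ++ [c])

def strip_default_args (signature : String) : String :=
  if signature = "()" then signature
  else
    let inner := PySem.Str.strip signature
    if ¬ (PySem.Str.startswith inner "(" = true) ∨ ¬ (PySem.Str.endswith inner ")" = true) then
      signature
    else
      let inner2 := PySem.Str.slice inner (some 1) (some (-1))
      let st := inner2.toList.foldl pvStepA (0, 0, 0, false, [])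
      let stripped := PySem.Str.strip (String.ofList st.2.2.2.2)
      if stripped ≠ "" then "(" ++ stripped ++ ")" else "()"

-- ===== PORT B =====
-- _split_top: split at commas at zero depth (depth updated before the test), accumulator style
def pvSplitTop : List Char → Int → Int → Int → List Char → List (List Char) → List (List Char)
  | [], _, _, _, cur, pieces => pieces ++ [cur]
  | c :: cs, dp, da, db, cur, pieces =>
    let (dp', da', db') := pvBump c dp da db
    if c = ',' ∧ dp' = 0 ∧ da' = 0 ∧ db' = 0 then pvSplitTop cs dp' da' db' [] (pieces ++ [cur])
    else pvSplitTop cs dp' da' db' (cur ++ [c]) pieces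

-- _before_eq: text of the piece before its first equals sign at zero depth (whole piece if none)
def pvBeforeEq : List Char → Int → Int → Int → List Char → List Char
  | [], _, _, _, out => out
  | c :: cs, dp, da, db, out =>
    let (dp', da', db') := pvBump c dp da db
    if c = '=' ∧ dp' = 0 ∧ da' = 0 ∧ db' = 0 then out
    else pvBeforeEq cs dp' da' db' (out ++ [c])

def strip_default_args_alt (signature : String) : String :=
  if signature = "()" then signature
  else
    let inner := PySem.Str.strip signature
    if ¬ (PySem.Str.startswith inner "(" = true) ∨ ¬ (PySem.Str.endswith inner ")" = true) then
      signature
    else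
      let inner2 := PySem.Str.slice inner (some 1) (some (-1))
      let pieces := pvSplitTop inner2.toList 0 0 0 [] []
      let stripped := PySem.Str.strip
        (PySem.Str.join "," (pieces.map (fun p => String.ofList (pvBeforeEq p 0 0 0 []))))
      if stripped ≠ "" then "(" ++ stripped ++ ")" else "()"

-- ===== PRECONDITION & SPEC =====
def Spec_strip_default_args (signature : String) (out : String) : Prop := out = strip_default_args_alt signature
instance (signature : String) (out : String) : Decidable (Spec_strip_default_args signature out) := by unfold Spec_strip_default_args; infer_instance

-- ===== CLAIM (what is proved, stated in full; the proofs are below) =====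
def Claim_equal_strip_default_args : Prop := ∀ (signature : String), Dom_strip_default_args signature → Spec_strip_default_args signature (strip_default_args signature)

-- ===== LEMMAS AND PROOFS =====

-- proof-side recursive forms of both algorithms (no accumulators)
def aRec : List Char → Int → Int → Int → Bool → List Char
  | [], _, _, _, _ => []
  | c :: cs, dp, da, db, sk =>
    let (dp', da', db') := pvBump c dp da db
    if sk then
      if c = ',' ∧ dp' = 0 ∧ da' = 0 ∧ db' = 0 then c :: aRec cs dp' da' db' false
      else aRec cs dp' da' db' true
    else if c = '=' ∧ dp' = 0 ∧ da' = 0 ∧ db' = 0 then aRec cs dp' da' db' true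
    else c :: aRec cs dp' da' db' sk

def splitRec : List Char → Int → Int → Int → List (List Char)
  | [], _, _, _ => [[]]
  | c :: cs, dp, da, db =>
    let (dp', da', db') := pvBump c dp da db
    if c = ',' ∧ dp' = 0 ∧ da' = 0 ∧ db' = 0 then [] :: splitRec cs dp' da' db'
    else
      match splitRec cs dp' da' db' with
      | [] => [[c]]
      | p :: ps => (c :: p) :: ps

def cutRec : List Char → Int → Int → Int → List Char
  | [], _, _, _ => []
  | c :: cs, dp, da, db =>
    let (dp', da', db') := pvBump c dp da db
    if c = '=' ∧ dp' = 0 ∧ da' = 0 ∧ db' = 0 then []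
    else c :: cutRec cs dp' da' db'

lemma foldA_eq (cs : List Char) : ∀ (dp da db : Int) (sk : Bool) (acc : List Char),
    (cs.foldl pvStepA (dp, da, db, sk, acc)).2.2.2.2 = acc ++ aRec cs dp da db sk := by
  induction cs with
  | nil => intro dp da db sk acc; simp [aRec]
  | cons c cs ih =>
    intro dp da db sk acc
    rcases hb : pvBump c dp da db with ⟨dp', da', db'⟩
    simp only [List.foldl, pvStepA, aRec, hb]
    split_ifs with h1 h2 h3 <;> simp [ih, List.append_assoc]

lemma splitRec_ne_nil (cs : List Char) (dp da db : Int) : splitRec cs dp da db ≠ [] := by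
  cases cs with
  | nil => simp [splitRec]
  | cons c cs =>
    rcases hb : pvBump c dp da db with ⟨dp', da', db'⟩
    simp only [splitRec, hb]
    split_ifs with h1
    · simp
    · rcases h : splitRec cs dp' da' db' with _ | ⟨p, ps⟩ <;> simp

lemma splitAcc_eq (cs : List Char) : ∀ (dp da db : Int) (cur : List Char) (pieces : List (List Char)),
    pvSplitTop cs dp da db cur pieces =
      pieces ++ (match splitRec cs dp da db with
                 | [] => [cur]
                 | p :: ps => (cur ++ p) :: ps) := by
  induction cs with
  | nil => intro dp da db cur pieces; simp [pvSplitTop, splitRec]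
  | cons c cs ih =>
    intro dp da db cur pieces
    rcases hb : pvBump c dp da db with ⟨dp', da', db'⟩
    simp only [pvSplitTop, splitRec, hb]
    rcases h : splitRec cs dp' da' db' with _ | ⟨p, ps⟩
    · exact absurd h (splitRec_ne_nil cs dp' da' db')
    split_ifs with h1
    · rw [ih, h]; simp
    · rw [ih, h]; simp

lemma cutAcc_eq (cs : List Char) : ∀ (dp da db : Int) (out : List Char),
    pvBeforeEq cs dp da db out = out ++ cutRec cs dp da db := by
  induction cs with
  | nil => intro dp da db out; simp [pvBeforeEq, cutRec]
  | cons c cs ih =>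
    intro dp da db out
    rcases hb : pvBump c dp da db with ⟨dp', da', db'⟩
    simp only [pvBeforeEq, cutRec, hb]
    split_ifs with h1
    · simp
    · rw [ih]; simp

def glue (l : List (List Char)) (dp da db : Int) : List Char :=
  match l with
  | [] => []
  | p :: ps => PySem.Chars.join [','] (cutRec p dp da db :: ps.map (fun q => cutRec q 0 0 0))

def glueSkip (l : List (List Char)) : List Char :=
  match l with
  | [] => []
  | _ :: ps => PySem.Chars.join [','] ([] :: ps.map (fun q => cutRec q 0 0 0))

lemma main_eq (cs : List Char) : ∀ (dp da db : Int),
    aRec cs dp da db false = glue (splitRec cs dp da db) dp da db ∧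
    aRec cs dp da db true = glueSkip (splitRec cs dp da db) := by
  induction cs with
  | nil =>
    intro dp da db
    simp [aRec, splitRec, glue, glueSkip, cutRec, PySem.Chars.join_singleton]
  | cons c cs ih =>
    intro dp da db
    rcases hb : pvBump c dp da db with ⟨dp', da', db'⟩
    obtain ⟨ihf, ihs⟩ := ih dp' da' db'
    have stepA_f : aRec (c :: cs) dp da db false =
        if c = '=' ∧ dp' = 0 ∧ da' = 0 ∧ db' = 0 then aRec cs dp' da' db' true
        else c :: aRec cs dp' da' db' false := by
      simp [aRec, hb]
    have stepA_t : aRec (c :: cs) dp da db true =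
        if c = ',' ∧ dp' = 0 ∧ da' = 0 ∧ db' = 0 then c :: aRec cs dp' da' db' false
        else aRec cs dp' da' db' true := by
      simp [aRec, hb]
    have stepS : splitRec (c :: cs) dp da db =
        if c = ',' ∧ dp' = 0 ∧ da' = 0 ∧ db' = 0 then [] :: splitRec cs dp' da' db'
        else match splitRec cs dp' da' db' with
             | [] => [[c]]
             | p :: ps => (c :: p) :: ps := by
      simp only [splitRec, hb]
    have stepC : ∀ x, cutRec (c :: x) dp da db =
        if c = '=' ∧ dp' = 0 ∧ da' = 0 ∧ db' = 0 then []
        else c :: cutRec x dp' da' db' := by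
      intro x; simp only [cutRec, hb]
    rcases hs : splitRec cs dp' da' db' with _ | ⟨p, ps⟩
    · exact absurd hs (splitRec_ne_nil cs dp' da' db')
    constructor
    · -- normal mode
      rw [stepA_f, stepS]
      by_cases h2 : c = '=' ∧ dp' = 0 ∧ da' = 0 ∧ db' = 0
      · have h1 : ¬(c = ',' ∧ dp' = 0 ∧ da' = 0 ∧ db' = 0) := by
          rintro ⟨e, -⟩; rw [e] at h2; exact absurd h2.1 (by decide)
        rw [if_pos h2, if_neg h1, hs, ihs, hs]
        simp only [glue, glueSkip, List.map_cons]
        rw [stepC p, if_pos h2]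
      · rw [if_neg h2]
        by_cases h1 : c = ',' ∧ dp' = 0 ∧ da' = 0 ∧ db' = 0
        · rw [if_pos h1, ihf, hs]
          obtain ⟨hc, e1, e2, e3⟩ := h1
          subst hc; subst e1; subst e2; subst e3
          simp only [glue, List.map_cons, cutRec]
          rw [PySem.Chars.join_cons_cons]
          simp
        · rw [if_neg h1, hs, ihf, hs]
          simp only [glue, List.map_cons]
          rw [stepC p, if_neg h2]
          cases ps with
          | nil => simp [PySem.Chars.join_singleton]
          | cons q qs =>
            simp only [List.map_cons]
            rw [PySem.Chars.join_cons_cons, PySem.Chars.join_cons_cons]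
            simp
    · -- skipping mode
      rw [stepA_t, stepS]
      by_cases h1 : c = ',' ∧ dp' = 0 ∧ da' = 0 ∧ db' = 0
      · rw [if_pos h1, if_pos h1, ihf, hs]
        obtain ⟨hc, e1, e2, e3⟩ := h1
        subst hc; subst e1; subst e2; subst e3
        simp only [glue, glueSkip, List.map_cons]
        rw [PySem.Chars.join_cons_cons]
        simp
      · rw [if_neg h1, if_neg h1, hs, ihs, hs]
        simp only [glueSkip]

lemma core_eq (l : List Char) :
    String.ofList (l.foldl pvStepA (0, 0, 0, false, [])).2.2.2.2 =
    PySem.Str.join "," ((pvSplitTop l 0 0 0 [] []).map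
      (fun p => String.ofList (pvBeforeEq p 0 0 0 []))) := by
  apply String.toList_inj.mp
  rw [foldA_eq, splitAcc_eq]
  rcases hs : splitRec l 0 0 0 with _ | ⟨p, ps⟩
  · exact absurd hs (splitRec_ne_nil l 0 0 0)
  have hm := (main_eq l 0 0 0).1
  rw [hs] at hm
  simp only [List.nil_append, hm, glue, List.map_cons]
  simp [cutAcc_eq, Function.comp_def]

-- ===== VERDICT (by name: the statement is the Claim_ definition above) =====
theorem strip_default_args_spec : Claim_equal_strip_default_args := by
  intro signature _
  show strip_default_args signature = strip_default_args_alt signature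
  simp only [strip_default_args, strip_default_args_alt, core_eq]
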